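-- pv_equiv track=rewrite | github.com/PrashantMittal54/Data-Structures-and-Algorithms | String/Spreadsheet Encoding String.py | spreadsheet_encode_column
-- ===== SOURCE A (Python) =====
-- def spreadsheet_encode_column(col_str):
--     idx = 0
--     power = len(col_str) - 1
--     num = 0
--     while idx < len(col_str):
--         num += (ord(col_str[idx]) + 1 - ord('A')) * (26**power)
--         power -= 1
--         idx += 1
--     return num
-- ===== SOURCE B (Python) =====
-- def spreadsheet_encode_column(col_str):
--     num = 0
--     for ch in col_str:
--         num = num * 26 + (ord(ch) + 1 - ord('A'))
--     return num
-- ===== Notes on version B (the rewrite author's own statement) =====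
-- stated objective: faster
-- what changed: Replaces the positional-weight sum that computes 26**power from scratch on every iteration with a single-pass Horner accumulation num = num*26 + digit.
import Mathlib
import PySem

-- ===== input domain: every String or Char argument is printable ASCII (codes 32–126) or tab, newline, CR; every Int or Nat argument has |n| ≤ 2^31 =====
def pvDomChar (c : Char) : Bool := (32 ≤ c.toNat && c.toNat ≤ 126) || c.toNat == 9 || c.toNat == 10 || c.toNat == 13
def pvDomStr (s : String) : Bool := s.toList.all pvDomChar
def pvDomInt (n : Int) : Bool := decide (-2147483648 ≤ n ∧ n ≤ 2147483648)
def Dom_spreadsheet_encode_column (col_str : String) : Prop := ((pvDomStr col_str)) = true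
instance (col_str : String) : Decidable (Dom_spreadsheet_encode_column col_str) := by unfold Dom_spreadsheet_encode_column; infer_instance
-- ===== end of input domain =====

-- B replaces A's per-position 26**power recomputation with a one-pass Horner accumulation (faster, asymptotic).


-- ===== PORT A =====
-- while loop of A: walks the characters in order, keeping (power, num);
-- power stays ≥ 0 throughout (it starts at len-1 and the loop stops at the end),
-- so 26**power is ported as 26 ^ power.toNat.
def pvALoop (cs : List Char) (power : Int) (num : Int) : Int :=
  match cs with
  | [] => num
  | c :: rest => pvALoop rest (power - 1) (num + ((c.toNat : Int) + 1 - 65) * 26 ^ power.toNat)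

def spreadsheet_encode_column (col_str : String) : Int :=
  pvALoop col_str.toList ((col_str.toList.length : Int) - 1) 0

-- ===== PORT B =====
def spreadsheet_encode_column_alt (col_str : String) : Int :=
  col_str.toList.foldl (fun num c => num * 26 + ((c.toNat : Int) + 1 - 65)) 0

-- ===== PRECONDITION & SPEC =====
def Spec_spreadsheet_encode_column (col_str : String) (out : Int) : Prop := out = spreadsheet_encode_column_alt col_str
instance (col_str : String) (out : Int) : Decidable (Spec_spreadsheet_encode_column col_str out) := by unfold Spec_spreadsheet_encode_column; infer_instance

-- ===== CLAIM (what is proved, stated in full; the proofs are below) =====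
def Claim_equal_spreadsheet_encode_column : Prop := ∀ (col_str : String), Dom_spreadsheet_encode_column col_str → Spec_spreadsheet_encode_column col_str (spreadsheet_encode_column col_str)

-- ===== LEMMAS AND PROOFS =====

-- Horner's fold started at num equals num·26^len plus the fold started at 0.
theorem pv_foldl_shift (cs : List Char) (num : Int) :
    cs.foldl (fun num c => num * 26 + ((c.toNat : Int) + 1 - 65)) num
      = num * 26 ^ cs.length + cs.foldl (fun num c => num * 26 + ((c.toNat : Int) + 1 - 65)) 0 := by
  induction cs generalizing num with
  | nil => simp
  | cons c rest ih =>
    simp only [List.foldl_cons, List.length_cons]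
    rw [ih (num * 26 + ((c.toNat : Int) + 1 - 65)), ih (0 * 26 + ((c.toNat : Int) + 1 - 65))]
    ring

-- A's loop, entered with power = len - 1, just adds the Horner value to num.
theorem pv_aLoop_eq (cs : List Char) (num : Int) :
    pvALoop cs ((cs.length : Int) - 1) num
      = num + cs.foldl (fun num c => num * 26 + ((c.toNat : Int) + 1 - 65)) 0 := by
  induction cs generalizing num with
  | nil => simp [pvALoop]
  | cons c rest ih =>
    have hp : (((c :: rest).length : Int) - 1 - 1) = ((rest.length : Int) - 1) := by
      simp
    have ht : (((c :: rest).length : Int) - 1).toNat = rest.length := by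
      simp
    simp only [pvALoop, hp, ht, List.foldl_cons]
    rw [ih, pv_foldl_shift rest (0 * 26 + ((c.toNat : Int) + 1 - 65))]
    ring

-- ===== VERDICT (by name: the statement is the Claim_ definition above) =====
theorem spreadsheet_encode_column_spec : Claim_equal_spreadsheet_encode_column := by
  intro col_str _
  unfold Spec_spreadsheet_encode_column spreadsheet_encode_column spreadsheet_encode_column_alt
  rw [pv_aLoop_eq]
  ring
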